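-- pv_equiv track=rewrite | github.com/benquick123/code-profiling | code/batch-2/dn7 - minolovec/M-17139-2534.py | zapisi_pot
-- ===== SOURCE A (Python) =====
-- def dolzina_poti(pot):
--     return sum(abs(pot[i][0] - pot[i + 1][0]) + abs(pot[i][1] - pot[i + 1][1]) for i in range(0, len(pot) - 1))
--
-- def zapisi_pot(pot):
--     """
--     Za podano pot vrni seznam ukazov (glej navodila naloge).
--
--     Args:
--         pot (list of tuple of int): pot
--
--     Returns:
--         str: ukazi, napisani po vrsticah
--     """
--
--     def spremeni_smer(nova_smer, ukaz):
--         if ukaz == "DESNO":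
--             if nova_smer == "GOR":
--                 nova_smer = "DESNO"
--                 return nova_smer
--
--             elif nova_smer == "DESNO":
--                 nova_smer = "DOL"
--                 return nova_smer
--
--             elif nova_smer == "DOL":
--                 nova_smer = "LEVO"
--                 return nova_smer
--
--             elif nova_smer == "LEVO":
--                 nova_smer = "GOR"
--                 return nova_smer
--
--         if ukaz == "LEVO":
--             if nova_smer == "GOR":
--                 nova_smer = "LEVO"
--                 return nova_smer
--
--             elif nova_smer == "LEVO":
--                 nova_smer = "DOL"
--                 return nova_smer
--
--             elif nova_smer == "DOL":
--                 nova_smer = "DESNO"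
--                 return nova_smer
--
--             elif nova_smer == "DESNO":
--                 nova_smer = "GOR"
--                 return nova_smer
--
--     def pridobi_smer(premik1, premik2):
--         pot1x, pot1y = premik1
--         pot2x, pot2y = premik2
--
--         if pot1y == pot2y:
--             if pot1x < pot2x:
--                 return "DESNO"
--
--             else:
--                 return "LEVO"
--
--         elif pot1y < pot2y:
--             return "DOL"
--
--         else:
--             return "GOR"
--
--     izpis = ""
--     smer = "GOR"
--
--     for i in range(0, len(pot) - 1):
--         pot1 = pot[i]
--         pot2 = pot[i + 1]
--         zeljena_smer = pridobi_smer(pot1, pot2)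
--         while smer != zeljena_smer:
--             izpis = izpis + "DESNO\n"
--             smer = spremeni_smer(smer, "DESNO")
--
--         dolzina_premika = dolzina_poti([pot1, pot2])
--         izpis = izpis + (str(dolzina_premika) + "\n")
--
--     return izpis
-- ===== SOURCE B (Python) =====
-- DIRS = ["GOR", "DESNO", "DOL", "LEVO"]  # clockwise order
--
--
-- def zapisi_pot(pot):
--     out = []
--     cur = 0  # index into DIRS, start facing GOR
--     for (x1, y1), (x2, y2) in zip(pot, pot[1:]):
--         if y1 == y2:
--             t = 1 if x1 < x2 else 3
--         elif y1 < y2: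
--             t = 2
--         else:
--             t = 0
--         out.append("DESNO\n" * ((t - cur) % 4))
--         out.append(str(abs(x1 - x2) + abs(y1 - y2)) + "\n")
--         cur = t
--     return "".join(out)
-- ===== Notes on version B (the rewrite author's own statement) =====
-- stated objective: simpler
-- what changed: Replaces the spremeni_smer string transition table and the step-by-step while rotation with direct modular turn-counting over heading indices in a clockwise DIRS list, emitting 'DESNO\n'*((t-cur)%4) per segment and joining collected pieces once.
import Mathlib
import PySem

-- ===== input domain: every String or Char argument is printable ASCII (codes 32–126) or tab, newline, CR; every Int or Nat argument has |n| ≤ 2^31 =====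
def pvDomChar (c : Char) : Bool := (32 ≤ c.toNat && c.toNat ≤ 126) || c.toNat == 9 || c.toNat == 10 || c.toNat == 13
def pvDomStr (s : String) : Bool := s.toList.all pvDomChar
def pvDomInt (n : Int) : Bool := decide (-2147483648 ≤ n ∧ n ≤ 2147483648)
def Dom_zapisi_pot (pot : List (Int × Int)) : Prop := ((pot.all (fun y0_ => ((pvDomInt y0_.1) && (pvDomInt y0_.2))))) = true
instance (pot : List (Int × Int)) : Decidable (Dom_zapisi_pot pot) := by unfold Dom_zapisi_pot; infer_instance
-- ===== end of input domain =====

-- B replaces A's string transition table and step-by-step while-loop rotation by modular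
-- turn-counting over heading indices in a clockwise DIRS list (objective: simpler).

-- ===== PORT A =====

-- sum(abs(pot[i][0]-pot[i+1][0]) + abs(pot[i][1]-pot[i+1][1]) for i in range(0, len(pot)-1));
-- every i the range yields makes both indices in range, so the pyGetD default is never used
def dolzina_poti (pot : List (Int × Int)) : Int :=
  ((PySem.List.pyRange 0 ((pot.length : Int) - 1) 1).map (fun i =>
    |(PySem.List.pyGetD pot i (0, 0)).1 - (PySem.List.pyGetD pot (i + 1) (0, 0)).1| +
    |(PySem.List.pyGetD pot i (0, 0)).2 - (PySem.List.pyGetD pot (i + 1) (0, 0)).2|)).sum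

-- the inner helper spremeni_smer: two successive if-blocks, falling through returns None
def spremeni_smer (nova_smer ukaz : String) : Option String :=
  match (if ukaz = "DESNO" then
           (if nova_smer = "GOR" then some "DESNO"
            else if nova_smer = "DESNO" then some "DOL"
            else if nova_smer = "DOL" then some "LEVO"
            else if nova_smer = "LEVO" then some "GOR"
            else none)
         else none) with
  | some r => some r
  | none =>
    if ukaz = "LEVO" then
      (if nova_smer = "GOR" then some "LEVO"
       else if nova_smer = "LEVO" then some "DOL"
       else if nova_smer = "DOL" then some "DESNO"
       else if nova_smer = "DESNO" then some "GOR"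
       else none)
    else none

def pridobi_smer (premik1 premik2 : Int × Int) : String :=
  if premik1.2 = premik2.2 then (if premik1.1 < premik2.1 then "DESNO" else "LEVO")
  else if premik1.2 < premik2.2 then "DOL"
  else "GOR"

-- the 'while smer != zeljena_smer' loop; fuel 4 only makes the same loop total (the headings
-- form a 4-cycle under "DESNO", so at most 3 iterations ever run and fuel is never exhausted);
-- spremeni_smer never returns none here, the getD fallback is unreachable
def zavrti (izpis smer zeljena : String) : Nat → String × String
  | 0 => (izpis, smer)
  | n + 1 =>
    if smer ≠ zeljena then
      zavrti (izpis ++ "DESNO\n") ((spremeni_smer smer "DESNO").getD smer) zeljena n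
    else (izpis, smer)

-- the for-loop over i in range(0, len(pot)-1), as structural recursion on adjacent pairs
def zapisi_pot_loop : List (Int × Int) → String → String → String
  | p1 :: p2 :: rest, izpis, smer =>
    let zeljena_smer := pridobi_smer p1 p2
    let r := zavrti izpis smer zeljena_smer 4
    let dolzina_premika := dolzina_poti [p1, p2]
    zapisi_pot_loop (p2 :: rest) (r.1 ++ (PySem.Int.toStr dolzina_premika ++ "\n")) r.2
  | _, izpis, _ => izpis

def zapisi_pot (pot : List (Int × Int)) : String :=
  zapisi_pot_loop pot "" "GOR"

-- ===== PORT B =====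

-- index of the desired heading in DIRS = ["GOR","DESNO","DOL","LEVO"]
def smerIdx (p1 p2 : Int × Int) : Int :=
  if p1.2 = p2.2 then (if p1.1 < p2.1 then (1 : Int) else 3)
  else if p1.2 < p2.2 then 2
  else 0

-- "DESNO\n" * n  (Python string repetition, via the PySem list-repetition primitive)
def pyStrMul (s : String) (n : Int) : String :=
  String.ofList (PySem.List.pyRepeat s.toList n)

-- B's for-loop over zip(pot, pot[1:]): collect pieces, join once at the end
def zapisi_pot_alt_loop : List (Int × Int) → List String → Int → List String
  | p1 :: p2 :: rest, out, cur =>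
    let t := smerIdx p1 p2
    zapisi_pot_alt_loop (p2 :: rest)
      (out ++ [pyStrMul "DESNO\n" (PySem.Int.mod (t - cur) 4),
               PySem.Int.toStr (|p1.1 - p2.1| + |p1.2 - p2.2|) ++ "\n"]) t
  | _, out, _ => out

def zapisi_pot_alt (pot : List (Int × Int)) : String :=
  PySem.Str.join "" (zapisi_pot_alt_loop pot [] 0)

-- ===== PRECONDITION & SPEC =====
def Spec_zapisi_pot (pot : List (Int × Int)) (out : String) : Prop := out = zapisi_pot_alt pot
instance (pot : List (Int × Int)) (out : String) : Decidable (Spec_zapisi_pot pot out) := by unfold Spec_zapisi_pot; infer_instance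

-- ===== CLAIM (what is proved, stated in full; the proofs are below) =====
def Claim_equal_zapisi_pot : Prop := ∀ (pot : List (Int × Int)), Dom_zapisi_pot pot → Spec_zapisi_pot pot (zapisi_pot pot)

-- ===== LEMMAS AND PROOFS =====

-- the heading named by an index of B
def dirOf (t : Int) : String :=
  if t = 0 then "GOR" else if t = 1 then "DESNO" else if t = 2 then "DOL" else "LEVO"

theorem interNil {α : Type} (l : List (List α)) : ([] : List α).intercalate l = l.flatten := by
  induction l with
  | nil => rfl
  | cons x xs ih =>
    cases xs with
    | nil => simp [List.intercalate]
    | cons y ys =>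
      simp [List.intercalate, List.intersperse] at ih ⊢
      exact ih

theorem joinE_nil : PySem.Str.join "" ([] : List String) = "" := by
  rw [← String.toList_inj]; simp [PySem.Str.join, PySem.Chars.join, interNil]

theorem joinE_append (xs ys : List String) :
    PySem.Str.join "" (xs ++ ys) = PySem.Str.join "" xs ++ PySem.Str.join "" ys := by
  rw [← String.toList_inj]
  simp [PySem.Str.join, PySem.Chars.join, interNil]

theorem joinE_pair (x y : String) : PySem.Str.join "" [x, y] = x ++ y := by
  rw [← String.toList_inj]
  simp [PySem.Str.join, PySem.Chars.join, interNil]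

theorem smerIdx_range (p1 p2 : Int × Int) : 0 ≤ smerIdx p1 p2 ∧ smerIdx p1 p2 < 4 := by
  unfold smerIdx; split_ifs <;> omega

theorem pridobi_eq_dirOf (p1 p2 : Int × Int) : pridobi_smer p1 p2 = dirOf (smerIdx p1 p2) := by
  unfold pridobi_smer smerIdx dirOf
  split_ifs <;> first | rfl | omega

theorem dolzina_two (p1 p2 : Int × Int) :
    dolzina_poti [p1, p2] = |p1.1 - p2.1| + |p1.2 - p2.2| := by
  unfold dolzina_poti
  have h2 : (([p1, p2] : List (Int × Int)).length : Int) - 1 = 1 := by simp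
  rw [h2, show PySem.List.pyRange 0 1 1 = [0] from by decide]
  norm_num [PySem.List.pyGetD_zero_cons, PySem.List.pyGetD_ofNat']

-- the rotation loop of A equals B's modular turn count, for each of the 16 heading pairs
theorem zavrti_eq (cur t : Int) (hc0 : 0 ≤ cur) (hc4 : cur < 4) (ht0 : 0 ≤ t) (ht4 : t < 4)
    (izpis : String) :
    zavrti izpis (dirOf cur) (dirOf t) 4 =
      (izpis ++ pyStrMul "DESNO\n" (PySem.Int.mod (t - cur) 4), dirOf t) := by
  interval_cases cur <;> interval_cases t <;>
    simp [zavrti, spremeni_smer, dirOf, pyStrMul, PySem.List.pyRepeat, PySem.Int.mod,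
          ← String.toList_inj, String.toList_append]

theorem altloop_shift (l : List (Int × Int)) (out : List String) (cur : Int) :
    zapisi_pot_alt_loop l out cur = out ++ zapisi_pot_alt_loop l [] cur := by
  induction l generalizing out cur with
  | nil => simp [zapisi_pot_alt_loop]
  | cons p1 rest ih =>
    cases rest with
    | nil => simp [zapisi_pot_alt_loop]
    | cons p2 rest' =>
      rw [zapisi_pot_alt_loop, zapisi_pot_alt_loop, ih, ih (out := [] ++ _)]
      simp

theorem loop_eq (l : List (Int × Int)) (cur : Int) (hc0 : 0 ≤ cur) (hc4 : cur < 4)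
    (izpis : String) :
    zapisi_pot_loop l izpis (dirOf cur) =
      izpis ++ PySem.Str.join "" (zapisi_pot_alt_loop l [] cur) := by
  induction l generalizing cur izpis with
  | nil => simp [zapisi_pot_loop, zapisi_pot_alt_loop, joinE_nil]
  | cons p1 rest ih =>
    cases rest with
    | nil => simp [zapisi_pot_loop, zapisi_pot_alt_loop, joinE_nil]
    | cons p2 rest' =>
      rw [zapisi_pot_loop, zapisi_pot_alt_loop]
      obtain ⟨ht0, ht4⟩ := smerIdx_range p1 p2
      rw [pridobi_eq_dirOf, zavrti_eq cur (smerIdx p1 p2) hc0 hc4 ht0 ht4 izpis]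
      simp only [List.nil_append]
      rw [altloop_shift (p2 :: rest') [_, _] (smerIdx p1 p2), joinE_append, joinE_pair,
          ih (smerIdx p1 p2) ht0 ht4, dolzina_two]
      simp [String.append_assoc]

-- ===== VERDICT (by name: the statement is the Claim_ definition above) =====
theorem zapisi_pot_spec : Claim_equal_zapisi_pot := by
  intro pot _
  unfold Spec_zapisi_pot zapisi_pot zapisi_pot_alt
  have h := loop_eq pot 0 (by norm_num) (by norm_num) ""
  simpa [dirOf] using h
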